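-- pv_equiv track=rewrite | github.com/cwlowder/blog-post-code | constraint-satisfaction/queens.py | columnConstraint
-- ===== SOURCE A (Python) =====
-- def columnConstraint(var, value, assignment):
-- 	if value != 'Q':
-- 		return True
-- 	for y in range(8):
-- 		if y != var[0]:
-- 			pos = (y, var[1])
-- 			if pos in assignment and assignment[pos] == 'Q':
-- 				return False
-- 	return True
-- ===== SOURCE B (Python) =====
-- def columnConstraint(var, value, assignment):
--     if value != 'Q':
--         return True
--     for pos, occupant in assignment.items():
--         if occupant == 'Q' and pos[1] == var[1] and pos[0] != var[0] and 0 <= pos[0] < 8: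
--             return False
--     return True
-- ===== Notes on version B (the rewrite author's own statement) =====
-- stated objective: alternative
-- what changed: B scans the occupied cells of the assignment once, rejecting on any other queen in var's column with row in 0..7, instead of A probing eight fixed board positions with a dict lookup each.
import Mathlib
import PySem

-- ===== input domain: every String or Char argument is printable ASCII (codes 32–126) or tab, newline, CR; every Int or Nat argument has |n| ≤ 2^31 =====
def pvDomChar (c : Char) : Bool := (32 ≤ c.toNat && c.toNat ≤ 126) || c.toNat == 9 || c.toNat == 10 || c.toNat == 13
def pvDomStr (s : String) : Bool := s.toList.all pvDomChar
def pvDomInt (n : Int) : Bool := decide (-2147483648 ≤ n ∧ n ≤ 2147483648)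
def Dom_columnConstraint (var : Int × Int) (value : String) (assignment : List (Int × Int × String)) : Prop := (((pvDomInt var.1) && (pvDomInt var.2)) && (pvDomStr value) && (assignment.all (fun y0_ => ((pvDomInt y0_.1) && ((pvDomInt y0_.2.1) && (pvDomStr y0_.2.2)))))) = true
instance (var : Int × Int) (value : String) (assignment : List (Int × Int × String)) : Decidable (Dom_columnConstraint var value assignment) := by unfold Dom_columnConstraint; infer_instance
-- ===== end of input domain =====

-- B enumerates the occupied cells of the assignment once instead of probing eight fixed board positions (alternative decomposition).
-- Pre_ excludes association lists with duplicate (row, col) keys: they do not encode a Python dict, so A's first-match lookup there is accidental.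


-- ===== PORT A =====
-- first-match lookup of key (r, c) in the association list (Python dict membership + indexing)
def aLookup (assignment : List (Int × Int × String)) (r c : Int) : Option String :=
  match assignment with
  | [] => none
  | (a, b, s) :: rest => if a == r && b == c then some s else aLookup rest r c

-- the 'for y in range(8)' loop with early return False
def aLoop (var : Int × Int) (assignment : List (Int × Int × String)) : List Int → Bool
  | [] => true
  | y :: rest =>
    if y != var.1 then
      match aLookup assignment y var.2 with
      | some s => if s == "Q" then false else aLoop var assignment rest
      | none => aLoop var assignment rest
    else aLoop var assignment rest

def columnConstraint (var : Int × Int) (value : String) (assignment : List (Int × Int × String)) : Bool :=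
  if value != "Q" then true
  else aLoop var assignment (PySem.List.pyRange 0 8 1)

-- ===== PORT B =====
-- scan over assignment.items() with early return False
def bScan (var : Int × Int) : List (Int × Int × String) → Bool
  | [] => true
  | (r, c, occ) :: rest =>
    if occ == "Q" && c == var.2 && r != var.1 && (decide (0 ≤ r) && decide (r < 8)) then false
    else bScan var rest

def columnConstraint_alt (var : Int × Int) (value : String) (assignment : List (Int × Int × String)) : Bool :=
  if value != "Q" then true
  else bScan var assignment

-- ===== PRECONDITION & SPEC =====
-- Pre_ excludes association lists with duplicate (row, col) keys: a Python dict cannot contain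
-- them, so they do not encode any input A runs on; on such lists A's first-match lookup order is accidental.
def Pre_columnConstraint (var : Int × Int) (value : String) (assignment : List (Int × Int × String)) : Prop :=
  (assignment.map (fun e => (e.1, e.2.1))).Nodup
instance (var : Int × Int) (value : String) (assignment : List (Int × Int × String)) : Decidable (Pre_columnConstraint var value assignment) := by unfold Pre_columnConstraint; infer_instance

def pvWitness_columnConstraint : (Int × Int) × String × (List (Int × Int × String)) :=
  ((0, 0), "Q", [(1, 0, "Q"), (2, 3, "X")])

def Spec_columnConstraint (var : Int × Int) (value : String) (assignment : List (Int × Int × String)) (out : Bool) : Prop := out = columnConstraint_alt var value assignment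
instance (var : Int × Int) (value : String) (assignment : List (Int × Int × String)) (out : Bool) : Decidable (Spec_columnConstraint var value assignment out) := by unfold Spec_columnConstraint; infer_instance

-- ===== CLAIM (what is proved, stated in full; the proofs are below) =====
def Claim_equal_columnConstraint : Prop := ∀ (var : Int × Int) (value : String) (assignment : List (Int × Int × String)), Dom_columnConstraint var value assignment → Pre_columnConstraint var value assignment → Spec_columnConstraint var value assignment (columnConstraint var value assignment)

-- ===== LEMMAS AND PROOFS =====

-- lookup returns some s whenever (r,c,s) is an entry and keys are duplicate-free
theorem aLookup_of_mem {assignment : List (Int × Int × String)} {r c : Int} {s : String}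
    (hnd : (assignment.map (fun e => (e.1, e.2.1))).Nodup)
    (hm : (r, c, s) ∈ assignment) : aLookup assignment r c = some s := by
  induction assignment with
  | nil => cases hm
  | cons hd tl ih =>
    obtain ⟨a, b, t⟩ := hd
    simp only [List.map_cons, List.nodup_cons] at hnd
    rcases List.mem_cons.mp hm with h | h
    · cases h
      simp [aLookup]
    · have hne : ¬(a = r ∧ b = c) := by
        rintro ⟨rfl, rfl⟩
        exact hnd.1 (List.mem_map.mpr ⟨(a, b, s), h, rfl⟩)
      simp only [aLookup]
      rw [if_neg (by simpa using hne)]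
      exact ih hnd.2 h

theorem mem_of_aLookup {assignment : List (Int × Int × String)} {r c : Int} {s : String}
    (h : aLookup assignment r c = some s) : (r, c, s) ∈ assignment := by
  induction assignment with
  | nil => simp [aLookup] at h
  | cons hd tl ih =>
    obtain ⟨a, b, t⟩ := hd
    simp only [aLookup] at h
    by_cases hab : a == r && b == c
    · rw [if_pos hab] at h
      simp at hab h
      simp [hab.1, hab.2, h]
    · rw [if_neg hab] at h
      exact List.mem_cons_of_mem _ (ih h)

theorem aLoop_eq_true_iff (var : Int × Int) (assignment : List (Int × Int × String)) (ys : List Int) :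
    aLoop var assignment ys = true ↔
      ∀ y ∈ ys, y ≠ var.1 → aLookup assignment y var.2 ≠ some "Q" := by
  induction ys with
  | nil => simp [aLoop]
  | cons y rest ih =>
    simp only [aLoop]
    by_cases hy : y = var.1
    · simp only [hy]
      rw [if_neg (by simp)]
      rw [ih]
      constructor
      · intro h z hz hzv
        rcases List.mem_cons.mp hz with rfl | hz'
        · exact absurd rfl hzv
        · exact h z hz' hzv
      · intro h z hz hzv; exact h z (List.mem_cons_of_mem _ hz) hzv
    · rw [if_pos (by simpa using hy)]
      cases hlk : aLookup assignment y var.2 with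
      | none => simp [ih, hy, hlk]
      | some s =>
        by_cases hs : s = "Q"
        · subst hs
          change false = true ↔ _
          simp only [Bool.false_eq_true, false_iff]
          intro h
          exact h y List.mem_cons_self hy hlk
        · change (if (s == "Q") = true then false else aLoop var assignment rest) = true ↔ _
          rw [if_neg (by simpa using hs)]
          rw [ih]
          constructor
          · intro h z hz hzv
            rcases List.mem_cons.mp hz with rfl | hz'
            · rw [hlk]; intro he; exact hs (Option.some.inj he)
            · exact h z hz' hzv
          · intro h z hz hzv; exact h z (List.mem_cons_of_mem _ hz) hzv

theorem bScan_eq_true_iff (var : Int × Int) (assignment : List (Int × Int × String)) :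
    bScan var assignment = true ↔
      ∀ e ∈ assignment, ¬(e.2.2 = "Q" ∧ e.2.1 = var.2 ∧ e.1 ≠ var.1 ∧ 0 ≤ e.1 ∧ e.1 < 8) := by
  induction assignment with
  | nil => simp [bScan]
  | cons hd tl ih =>
    obtain ⟨r, c, occ⟩ := hd
    simp only [bScan]
    by_cases hc : occ == "Q" && c == var.2 && r != var.1 && (decide (0 ≤ r) && decide (r < 8))
    · rw [if_pos hc]
      simp only [Bool.and_eq_true, beq_iff_eq, bne_iff_ne, decide_eq_true_eq] at hc
      simp only [Bool.false_eq_true, false_iff, not_forall]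
      exact ⟨(r, c, occ), List.mem_cons_self, fun h => h ⟨hc.1.1.1, hc.1.1.2, hc.1.2, hc.2.1, hc.2.2⟩⟩
    · rw [if_neg hc]
      simp only [Bool.and_eq_true, beq_iff_eq, bne_iff_ne, decide_eq_true_eq, not_and, not_lt] at hc
      rw [ih]
      constructor
      · intro h
        intro e he
        rcases List.mem_cons.mp he with rfl | he'
        · rintro ⟨h1, h2, h3, h4, h5⟩
          have := hc ⟨⟨h1, h2⟩, h3⟩ h4
          omega
        · exact h e he'
      · intro h e he
        exact h e (List.mem_cons_of_mem _ he)

theorem pyRange08 : PySem.List.pyRange 0 8 1 = [0, 1, 2, 3, 4, 5, 6, 7] := by decide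

-- ===== VERDICT (by name: the statement is the Claim_ definition above) =====
theorem columnConstraint_spec : Claim_equal_columnConstraint := by
  intro var value assignment _hdom hpre
  unfold Spec_columnConstraint columnConstraint columnConstraint_alt
  by_cases hv : value = "Q"
  · rw [if_neg (by simp [hv]), if_neg (by simp [hv])]
    have hA := aLoop_eq_true_iff var assignment (PySem.List.pyRange 0 8 1)
    have hB := bScan_eq_true_iff var assignment
    have hiff : aLoop var assignment (PySem.List.pyRange 0 8 1) = true ↔ bScan var assignment = true := by
      rw [hA, hB, pyRange08]
      constructor
      · intro h e he
        rintro ⟨h1, h2, h3, h4, h5⟩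
        obtain ⟨r, c, occ⟩ := e
        simp only at h1 h2 h3 h4 h5
        subst h1; subst h2
        have hy : r ∈ ([0, 1, 2, 3, 4, 5, 6, 7] : List Int) := by
          simp; omega
        exact h r hy h3 (aLookup_of_mem hpre he)
      · intro h y hy hYv hlk
        have hm := mem_of_aLookup hlk
        have hrng : 0 ≤ y ∧ y < 8 := by
          simp at hy; omega
        exact h (y, var.2, "Q") hm ⟨rfl, rfl, hYv, hrng.1, hrng.2⟩
    cases hA' : aLoop var assignment (PySem.List.pyRange 0 8 1) with
    | true => exact (hiff.mp hA').symm
    | false =>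
      cases hB' : bScan var assignment with
      | false => rfl
      | true => exact absurd (hiff.mpr hB') (by simp [hA'])
  · rw [if_pos (by simpa using hv), if_pos (by simpa using hv)]
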